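-- pv_equiv track=rewrite | github.com/manwar/perlweeklychallenge-club | challenge-228/roger-bell-west/python/ch-2.py | emptyarray
-- ===== SOURCE A (Python) =====
-- from collections import deque
--
-- def emptyarray(a0):
--   t = 0
--   a = deque(a0)
--   while len(a) > 0:
--     mn = min(a)
--     for i, v in enumerate(a):
--       if v == mn:
--         t += i + 1
--         del a[i]
--         break
--   return t
-- ===== SOURCE B (Python) =====
-- def emptyarray(a0):
--   # total cost = n + number of inversions (pairs i<j with a0[i] > a0[j]),
--   # counted in O(n log n) by a merge sort.
--   def sort_count(lst):
--     if len(lst) < 2: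
--       return lst, 0
--     mid = len(lst) // 2
--     left, cl = sort_count(lst[:mid])
--     right, cr = sort_count(lst[mid:])
--     merged = []
--     cross = 0
--     i = 0
--     j = 0
--     while i < len(left) and j < len(right):
--       if left[i] <= right[j]:
--         merged.append(left[i])
--         i += 1
--       else:
--         cross += len(left) - i
--         merged.append(right[j])
--         j += 1
--     merged.extend(left[i:])
--     merged.extend(right[j:])
--     return merged, cl + cr + cross
--   return len(a0) + sort_count(a0)[1]
-- ===== Notes on version B (the rewrite author's own statement) =====
-- stated objective: faster
-- what changed: Replaces the O(n^2) simulation (repeated min-scan and deque deletion) by the closed form n + inversion count, computed with a merge sort that counts cross inversions.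
import Mathlib
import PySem

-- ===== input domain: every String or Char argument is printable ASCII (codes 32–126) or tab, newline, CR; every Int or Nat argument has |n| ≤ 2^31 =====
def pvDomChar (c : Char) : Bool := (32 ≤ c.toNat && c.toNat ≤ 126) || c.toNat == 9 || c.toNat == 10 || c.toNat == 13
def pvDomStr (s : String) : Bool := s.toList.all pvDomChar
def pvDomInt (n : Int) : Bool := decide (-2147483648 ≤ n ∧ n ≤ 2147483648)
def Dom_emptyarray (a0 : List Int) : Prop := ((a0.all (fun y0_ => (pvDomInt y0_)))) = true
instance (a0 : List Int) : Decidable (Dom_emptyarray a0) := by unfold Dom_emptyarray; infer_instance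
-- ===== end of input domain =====

-- B replaces A's O(n^2) remove-the-minimum simulation by n + inversion count via merge sort.

-- ===== PORT A =====
-- inner 'for i, v in enumerate(a): if v == mn: … break' — index of the first element equal to mn
def pvFindA (mn : Int) (i : Nat) : List Int → Option Nat
  | [] => none
  | v :: rest => if v == mn then some i else pvFindA mn (i + 1) rest

-- needed by the port's termination proof
theorem pvFindA_lt {mn : Int} : ∀ {l : List Int} {k j : Nat}, pvFindA mn k l = some j → j < k + l.length := by
  intro l
  induction l with
  | nil => intro k j h; simp [pvFindA] at h
  | cons v rest ih =>
    intro k j h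
    simp only [pvFindA] at h
    split at h
    · simp at h; subst h; simp [List.length_cons]
    · have := ih h; simp [List.length_cons]; omega

-- the 'while len(a) > 0' loop of A
def pvLoopA (t : Int) (a : List Int) : Int :=
  if a.length > 0 then
    match PySem.List.min? a (fun x => x) with
    | none => t            -- unreachable: a is nonempty
    | some mn =>
      match hf : pvFindA mn 0 a with
      | none => t          -- unreachable: mn ∈ a (Python would loop forever here)
      | some i => pvLoopA (t + (i : Int) + 1) (a.eraseIdx i)
  else t
termination_by a.length
decreasing_by
  have h := pvFindA_lt hf
  simp only [Nat.zero_add] at h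
  simp [List.length_eraseIdx, h]
  omega

def emptyarray (a0 : List Int) : Int := pvLoopA 0 a0

-- ===== PORT B =====
-- the merge loop of Source B's sort_count: returns (merged, cross-inversion count)
def pvMergeC : List Int → List Int → List Int × Nat
  | [], r => (r, 0)
  | x :: l, [] => (x :: l, 0)
  | x :: l, y :: r =>
    if x ≤ y then
      let p := pvMergeC l (y :: r)
      (x :: p.1, p.2)
    else
      let p := pvMergeC (x :: l) r
      (y :: p.1, p.2 + (x :: l).length)
termination_by l r => l.length + r.length

-- sort_count of Source B
def pvSortC (l : List Int) : List Int × Nat :=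
  if l.length < 2 then (l, 0)
  else
    let L := pvSortC (l.take (l.length / 2))
    let R := pvSortC (l.drop (l.length / 2))
    let M := pvMergeC L.1 R.1
    (M.1, L.2 + R.2 + M.2)
termination_by l.length
decreasing_by
  · simp only [List.length_take]; omega
  · simp only [List.length_drop]; omega

def emptyarray_alt (a0 : List Int) : Int := (a0.length : Int) + ((pvSortC a0).2 : Int)

-- ===== PRECONDITION & SPEC =====
def Spec_emptyarray (a0 : List Int) (out : Int) : Prop := out = emptyarray_alt a0
instance (a0 : List Int) (out : Int) : Decidable (Spec_emptyarray a0 out) := by unfold Spec_emptyarray; infer_instance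

-- ===== CLAIM (what is proved, stated in full; the proofs are below) =====
def Claim_equal_emptyarray : Prop := ∀ (a0 : List Int), Dom_emptyarray a0 → Spec_emptyarray a0 (emptyarray a0)

-- ===== LEMMAS AND PROOFS =====

-- number of inversions: pairs i < j with l[i] > l[j]
def pvInv : List Int → Nat
  | [] => 0
  | x :: xs => xs.countP (fun y => decide (y < x)) + pvInv xs

-- cross inversions between the left part l1 and the right part l2
def pvCross (l1 l2 : List Int) : Nat := (l1.map (fun x => l2.countP (fun y => decide (y < x)))).sum

theorem pvCross_nil_right (l : List Int) : pvCross l [] = 0 := by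
  simp [pvCross]

theorem pvCross_cons_right (l1 : List Int) (y : Int) (l2 : List Int) :
    pvCross l1 (y :: l2) = l1.countP (fun x => decide (y < x)) + pvCross l1 l2 := by
  induction l1 with
  | nil => simp [pvCross]
  | cons x l ih =>
    simp only [pvCross, List.map_cons, List.sum_cons, List.countP_cons] at *
    rw [ih]
    by_cases h : y < x <;> simp [h] <;> omega

theorem pvCross_perm_left {l1 l1' : List Int} (h : l1.Perm l1') (l2 : List Int) :
    pvCross l1 l2 = pvCross l1' l2 := by
  unfold pvCross
  exact (h.map _).sum_eq

theorem pvCross_perm_right (l1 : List Int) {l2 l2' : List Int} (h : l2.Perm l2') :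
    pvCross l1 l2 = pvCross l1 l2' := by
  unfold pvCross
  congr 1
  exact List.map_congr_left (fun x _ => h.countP_eq _)

theorem pvInv_append (l1 l2 : List Int) :
    pvInv (l1 ++ l2) = pvInv l1 + pvCross l1 l2 + pvInv l2 := by
  induction l1 with
  | nil => simp [pvInv, pvCross]
  | cons x l ih =>
    simp only [List.cons_append, pvInv, List.countP_append, ih, pvCross, List.map_cons,
      List.sum_cons]
    omega

-- merged list is a permutation of the two inputs
theorem pvMergeC_perm : ∀ (l r : List Int), (pvMergeC l r).1.Perm (l ++ r) := by
  intro l r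
  fun_induction pvMergeC with
  | case1 r => simp
  | case2 x l => simp
  | case3 x l y r hle p ih =>
    simpa using ih.cons x
  | case4 x l y r hle p ih =>
    refine List.Perm.trans (ih.cons y) ?_
    exact (List.perm_middle.symm)

theorem pvMergeC_sorted : ∀ (l r : List Int),
    l.Pairwise (· ≤ ·) → r.Pairwise (· ≤ ·) → (pvMergeC l r).1.Pairwise (· ≤ ·) := by
  intro l r
  fun_induction pvMergeC with
  | case1 r => intro _ hr; exact hr
  | case2 x l => intro hl _; exact hl
  | case3 x l y r hle p ih =>
    intro hl hr
    rcases List.pairwise_cons.mp hl with ⟨hx, hl'⟩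
    refine List.pairwise_cons.mpr ⟨?_, ih hl' hr⟩
    intro b hb
    have hb' := (pvMergeC_perm l (y :: r)).mem_iff.mp hb
    rcases List.mem_append.mp hb' with h | h
    · exact hx _ h
    · rcases List.mem_cons.mp h with rfl | h
      · exact hle
      · exact le_trans hle (List.rel_of_pairwise_cons hr h)
  | case4 x l y r hle p ih =>
    intro hl hr
    rcases List.pairwise_cons.mp hr with ⟨hy, hr'⟩
    refine List.pairwise_cons.mpr ⟨?_, ih hl hr'⟩
    intro b hb
    have hb' := (pvMergeC_perm (x :: l) r).mem_iff.mp hb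
    rcases List.mem_append.mp hb' with h | h
    · rcases List.mem_cons.mp h with rfl | h
      · omega
      · have := List.rel_of_pairwise_cons hl h; omega
    · exact hy _ h

theorem pvMergeC_count : ∀ (l r : List Int),
    l.Pairwise (· ≤ ·) → r.Pairwise (· ≤ ·) → (pvMergeC l r).2 = pvCross l r := by
  intro l r
  fun_induction pvMergeC with
  | case1 r => intro _ _; simp [pvCross]
  | case2 x l => intro _ _; simp [pvCross_nil_right]
  | case3 x l y r hle p ih =>
    intro hl hr
    rcases List.pairwise_cons.mp hl with ⟨hx, hl'⟩
    have hzero : (y :: r).countP (fun z => decide (z < x)) = 0 := by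
      rw [List.countP_eq_zero]
      intro z hz
      rcases List.mem_cons.mp hz with rfl | hz
      · simp; omega
      · have := List.rel_of_pairwise_cons hr hz
        simp; omega
    simp only [pvCross, List.map_cons, List.sum_cons, hzero, Nat.zero_add]
    exact ih hl' hr
  | case4 x l y r hle p ih =>
    intro hl hr
    rcases List.pairwise_cons.mp hr with ⟨hy, hr'⟩
    rw [pvCross_cons_right]
    have hall : (x :: l).countP (fun z => decide (y < z)) = (x :: l).length := by
      rw [List.countP_eq_length]
      intro z hz
      rcases List.mem_cons.mp hz with rfl | hz
      · simp; omega
      · have := List.rel_of_pairwise_cons hl hz; simp; omega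
    rw [ih hl hr', hall]
    omega

theorem pvSortC_spec : ∀ (l : List Int),
    (pvSortC l).1.Perm l ∧ (pvSortC l).1.Pairwise (· ≤ ·) ∧ (pvSortC l).2 = pvInv l := by
  intro l
  fun_induction pvSortC with
  | case1 l h =>
    refine ⟨List.Perm.refl _, ?_, ?_⟩
    · match l, h with
      | [], _ => simp
      | [x], _ => simp
    · match l, h with
      | [], _ => simp [pvInv]
      | [x], _ => simp [pvInv]
  | case2 l h L R M ihL ihR =>
    obtain ⟨pL, sL, cL⟩ := ihL
    obtain ⟨pR, sR, cR⟩ := ihR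
    have hperm : M.1.Perm l := by
      have := pvMergeC_perm L.1 R.1
      refine this.trans ?_
      have := (pL.append pR).trans (by rw [List.take_append_drop])
      exact this
    refine ⟨hperm, pvMergeC_sorted _ _ sL sR, ?_⟩
    have hM : M.2 = pvCross L.1 R.1 := pvMergeC_count _ _ sL sR
    have hcross : pvCross L.1 R.1 = pvCross (l.take (l.length / 2)) (l.drop (l.length / 2)) := by
      rw [pvCross_perm_left pL, pvCross_perm_right _ pR]
    show L.2 + R.2 + M.2 = pvInv l
    rw [cL, cR, hM, hcross]
    have := pvInv_append (l.take (l.length / 2)) (l.drop (l.length / 2))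
    rw [List.take_append_drop] at this
    omega

-- ===== A-side lemmas =====

theorem pvFindA_isSome {mn : Int} : ∀ {l : List Int} (k : Nat), mn ∈ l → (pvFindA mn k l).isSome := by
  intro l
  induction l with
  | nil => intro k h; simp at h
  | cons v rest ih =>
    intro k h
    simp only [pvFindA]
    split
    · simp
    · rcases List.mem_cons.mp h with rfl | h
      · simp_all
      · exact ih _ h

theorem pvFindA_spec {mn : Int} : ∀ {l : List Int} {k j : Nat}, pvFindA mn k l = some j →
    k ≤ j ∧ (j - k) < l.length ∧ l[j - k]? = some mn ∧ ∀ m < j - k, l[m]? ≠ some mn := by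
  intro l
  induction l with
  | nil => intro k j h; simp [pvFindA] at h
  | cons v rest ih =>
    intro k j h
    simp only [pvFindA] at h
    split at h
    · rename_i hv
      simp at h hv
      subst h
      refine ⟨le_refl _, by simp, ?_, ?_⟩
      · simp [hv]
      · intro m hm; omega
    · rename_i hv
      simp at hv
      obtain ⟨h1, h2, h3, h4⟩ := ih h
      have hk : k < j := by omega
      refine ⟨by omega, ?_, ?_, ?_⟩
      · simp [List.length_cons]; omega
      · have : j - k = (j - (k+1)) + 1 := by omega
        rw [this]
        simpa using h3
      · intro m hm
        match m with
        | 0 => simp; omega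
        | Nat.succ m' =>
          simp only [List.getElem?_cons_succ]
          exact h4 m' (by omega)

-- one element with predicate true removed changes countP by one
theorem countP_eraseIdx (p : Int → Bool) : ∀ (l : List Int) (k : Nat) (v : Int),
    l[k]? = some v → l.countP p = (l.eraseIdx k).countP p + (if p v then 1 else 0) := by
  intro l
  induction l with
  | nil => intro k v h; simp at h
  | cons x xs ih =>
    intro k v h
    match k with
    | 0 =>
      simp at h
      subst h
      simp [List.countP_cons]
    | Nat.succ k' =>
      simp only [List.getElem?_cons_succ] at h
      simp only [List.eraseIdx_cons_succ, List.countP_cons]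
      rw [ih k' v h]
      split <;> omega

-- removing the FIRST occurrence of the minimum at index i removes exactly i inversions
theorem pvInv_erase (mn : Int) : ∀ (l : List Int) (i : Nat),
    (∀ y ∈ l, mn ≤ y) → l[i]? = some mn → (∀ m < i, l[m]? ≠ some mn) →
    pvInv l = i + pvInv (l.eraseIdx i) := by
  intro l
  induction l with
  | nil => intro i _ h _; simp at h
  | cons x xs ih =>
    intro i hmin hget hfirst
    match i with
    | 0 =>
      simp at hget
      subst hget
      simp only [List.eraseIdx_cons_zero, pvInv, Nat.zero_add]
      have : xs.countP (fun y => decide (y < x)) = 0 := by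
        rw [List.countP_eq_zero]
        intro y hy
        have := hmin y (List.mem_cons_of_mem _ hy)
        simp; omega
      omega
    | Nat.succ k =>
      simp only [List.getElem?_cons_succ] at hget
      have hxne : x ≠ mn := by
        have := hfirst 0 (Nat.succ_pos k)
        simpa using this
      have hxgt : mn < x := by
        have := hmin x (List.mem_cons_self)
        omega
      have ihk : pvInv xs = k + pvInv (xs.eraseIdx k) := by
        refine ih k (fun y hy => hmin y (List.mem_cons_of_mem _ hy)) hget ?_
        intro m hm
        have := hfirst (m + 1) (by omega)
        simpa using this
      simp only [List.eraseIdx_cons_succ, pvInv]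
      have hc := countP_eraseIdx (fun y => decide (y < x)) xs k mn hget
      simp only [decide_eq_true_eq, if_pos hxgt] at hc
      omega

-- the loop invariant: A's loop returns t + |a| + inv(a)
theorem pvLoopA_eq : ∀ (t : Int) (a : List Int), pvLoopA t a = t + a.length + pvInv a := by
  intro t a
  fun_induction pvLoopA with
  | case1 t a hlen hm =>
    -- min? = none on a nonempty list: impossible
    exfalso
    rw [PySem.List.min?_eq_none_iff] at hm
    subst hm
    simp at hlen
  | case2 t a hlen mn hm hf =>
    -- pvFindA = none although mn ∈ a: impossible
    exfalso
    have hmem := PySem.List.min?_mem hm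
    have := pvFindA_isSome (mn := mn) 0 hmem
    rw [hf] at this
    simp at this
  | case3 t a hlen mn hm i hf ih =>
    obtain ⟨_, hlt, hget, hfirst⟩ := pvFindA_spec hf
    simp only [Nat.sub_zero] at hlt hget hfirst
    have hmin : ∀ y ∈ a, mn ≤ y := PySem.List.min?_isMin hm
    have hinv : pvInv a = i + pvInv (a.eraseIdx i) := pvInv_erase mn a i hmin hget hfirst
    have hlen' : (a.eraseIdx i).length = a.length - 1 := by
      simp [List.length_eraseIdx, hlt]
    rw [ih, hinv, hlen']
    have : 1 ≤ a.length := by omega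
    push_cast
    omega
  | case4 t a hlen =>
    have : a = [] := by
      cases a with
      | nil => rfl
      | cons x xs => simp at hlen
    subst this
    simp [pvInv]

-- ===== VERDICT (by name: the statement is the Claim_ definition above) =====
theorem emptyarray_spec : Claim_equal_emptyarray := by
  intro a0 _
  show emptyarray a0 = emptyarray_alt a0
  unfold emptyarray emptyarray_alt
  rw [pvLoopA_eq, (pvSortC_spec a0).2.2]
  omega
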